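-- pv_equiv track=rewrite | github.com/Mome/DeepFanFic | qrnnlm.py | encode_docs
-- ===== SOURCE A (Python) =====
-- def encode_docs(docs):
--     """
--     Encodes a list of documents into the necessary format for the RNN
--     Returns a tuple of vocabulary and encoded documents
--     texts :: list of documents to prepare
--     """
--     voc = {"<s>":0, "</s>":1} # mapping of words to encoding
--     vlist = ["<s>", "</s>"] # vocabulary list
--     edocs = [] # list of encoded documents
--     for doc in docs:
--         edoc = []
--         for word in doc:
--             if word not in voc:
--                 voc[word] = len(vlist)
--                 vlist.append(word)
--             edoc.append(voc[word])
--         if len(edoc) > 0: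
--             edoc.append(1) # end word
--             edocs.append(edoc)
--     return (vlist, edocs)
-- ===== SOURCE B (Python) =====
-- def encode_docs(docs):
--     """
--     Encodes a list of documents into the necessary format for the RNN
--     Returns a tuple of vocabulary and encoded documents
--     texts :: list of documents to prepare
--     """
--     docs = [list(d) for d in docs]  # materialize (accepts generators like A does)
--     # pass 1: build the vocabulary in first-occurrence order
--     voc = {"<s>": 0, "</s>": 1}
--     vlist = ["<s>", "</s>"]
--     for doc in docs:
--         for word in doc:
--             if word not in voc:
--                 voc[word] = len(vlist)
--                 vlist.append(word)
--     # pass 2: encode each non-empty document against the completed table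
--     edocs = []
--     for doc in docs:
--         if doc:
--             edocs.append([voc[w] for w in doc] + [1])
--     return (vlist, edocs)
-- ===== Notes on version B (the rewrite author's own statement) =====
-- stated objective: alternative
-- what changed: A interleaves vocabulary growth with encoding in one loop; B first builds the complete vocabulary in one pass, then encodes every document in a second pass against the finished table (valid because dict insertions never change existing entries).
import Mathlib
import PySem

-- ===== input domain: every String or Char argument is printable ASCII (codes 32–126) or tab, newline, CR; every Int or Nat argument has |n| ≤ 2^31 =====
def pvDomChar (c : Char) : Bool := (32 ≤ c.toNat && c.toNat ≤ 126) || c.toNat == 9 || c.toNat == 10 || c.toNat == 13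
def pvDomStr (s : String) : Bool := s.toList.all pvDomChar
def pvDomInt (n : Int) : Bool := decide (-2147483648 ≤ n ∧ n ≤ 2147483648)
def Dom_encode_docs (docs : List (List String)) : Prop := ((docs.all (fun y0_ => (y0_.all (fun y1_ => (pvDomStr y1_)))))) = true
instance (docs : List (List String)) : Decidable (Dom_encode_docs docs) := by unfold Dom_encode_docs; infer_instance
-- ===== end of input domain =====

-- B replaces A's single interleaved loop by two passes: build the full vocabulary first, then
-- encode every document against the finished table (objective: alternative decomposition).


-- ===== PORT A =====
-- inner loop body: 'if word not in voc: voc[word]=len(vlist); vlist.append(word)' then 'edoc.append(voc[word])'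
-- ('voc[word]' is ported as getD word 0 — exact, since the key is always present at that point)
def encodeWordA (st : PySem.Dict String Int × List String × List Int) (word : String) :
    PySem.Dict String Int × List String × List Int :=
  let p := if st.1.contains word then (st.1, st.2.1)
           else (st.1.insert word (st.2.1.length : Int), st.2.1 ++ [word])
  (p.1, p.2, st.2.2 ++ [p.1.getD word 0])

-- outer loop body: encode one doc, append 'edoc + [1]' to edocs when edoc is non-empty
def encodeDocA (st : PySem.Dict String Int × List String × List (List Int)) (doc : List String) :
    PySem.Dict String Int × List String × List (List Int) :=
  let r := doc.foldl encodeWordA (st.1, st.2.1, [])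
  if 0 < r.2.2.length then (r.1, r.2.1, st.2.2 ++ [r.2.2 ++ [(1 : Int)]])
  else (r.1, r.2.1, st.2.2)

def encode_docs (docs : List (List String)) : List String × List (List Int) :=
  let st := docs.foldl encodeDocA
    (PySem.Dict.ofList [("<s>", (0 : Int)), ("</s>", (1 : Int))], ["<s>", "</s>"], [])
  (st.2.1, st.2.2)

-- ===== PORT B =====
-- pass 1 body: grow (voc, vlist) by one word
def buildWord (p : PySem.Dict String Int × List String) (word : String) :
    PySem.Dict String Int × List String :=
  if p.1.contains word then p else (p.1.insert word (p.2.length : Int), p.2 ++ [word])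

def buildDoc (p : PySem.Dict String Int × List String) (doc : List String) :
    PySem.Dict String Int × List String :=
  doc.foldl buildWord p

def encode_docs_alt (docs : List (List String)) : List String × List (List Int) :=
  let p := docs.foldl buildDoc
    (PySem.Dict.ofList [("<s>", (0 : Int)), ("</s>", (1 : Int))], ["<s>", "</s>"])
  let edocs := docs.foldl
    (fun acc doc => if doc.isEmpty then acc
                    else acc ++ [doc.map (fun w => p.1.getD w 0) ++ [(1 : Int)]]) []
  (p.2, edocs)

-- ===== PRECONDITION & SPEC =====
def Spec_encode_docs (docs : List (List String)) (out : List String × List (List Int)) : Prop := out = encode_docs_alt docs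
instance (docs : List (List String)) (out : List String × List (List Int)) : Decidable (Spec_encode_docs docs out) := by unfold Spec_encode_docs; infer_instance

-- ===== CLAIM (what is proved, stated in full; the proofs are below) =====
def Claim_equal_encode_docs : Prop := ∀ (docs : List (List String)), Dom_encode_docs docs → Spec_encode_docs docs (encode_docs docs)

-- ===== LEMMAS AND PROOFS =====

-- 'F extends G': every binding of F is still present in G (dict inserts of fresh keys preserve lookups)
def DSub (F G : PySem.Dict String Int) : Prop :=
  ∀ w v, F.get? w = some v → G.get? w = some v

theorem dsub_refl (F : PySem.Dict String Int) : DSub F F := fun _ _ h => h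

theorem dsub_buildWord (p : PySem.Dict String Int × List String) (word : String) :
    DSub p.1 (buildWord p word).1 := by
  intro w v h
  unfold buildWord
  split
  · exact h
  · rename_i hc
    simp only [PySem.Dict.get?_insert]
    split
    · rename_i hew; subst hew
      rw [PySem.Dict.contains_eq_isSome_get?, h] at hc; simp at hc
    · exact h

theorem dsub_trans {F G H : PySem.Dict String Int} (h1 : DSub F G) (h2 : DSub G H) : DSub F H :=
  fun w v h => h2 w v (h1 w v h)

theorem dsub_buildDoc (p : PySem.Dict String Int × List String) (doc : List String) :
    DSub p.1 (buildDoc p doc).1 := by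
  induction doc generalizing p with
  | nil => exact dsub_refl _
  | cons w rest ih =>
      exact dsub_trans (dsub_buildWord p w) (ih (buildWord p w))

theorem dsub_foldl_buildDoc (p : PySem.Dict String Int × List String) (ds : List (List String)) :
    DSub p.1 (ds.foldl buildDoc p).1 := by
  induction ds generalizing p with
  | nil => exact dsub_refl _
  | cons d rest ih =>
      exact dsub_trans (dsub_buildDoc p d) (ih (buildDoc p d))

theorem contains_buildWord_self (p : PySem.Dict String Int × List String) (word : String) :
    (buildWord p word).1.contains word = true := by
  unfold buildWord
  split
  · assumption
  · exact PySem.Dict.contains_insert_self _ _ _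

theorem getD_eq_of_sub {F G : PySem.Dict String Int} (h : DSub F G) (w : String)
    (hc : F.contains w = true) : F.getD w 0 = G.getD w 0 := by
  rw [PySem.Dict.contains_eq_isSome_get?] at hc
  cases he : F.get? w with
  | none => rw [he] at hc; simp at hc
  | some v =>
      rw [PySem.Dict.getD_eq_get?_getD, PySem.Dict.getD_eq_get?_getD, he, h w v he]

-- A's inner loop over one doc = B's pass-1 state change plus the encoding against any extension F
theorem innerA_eq (doc : List String) (p : PySem.Dict String Int × List String)
    (edoc : List Int) (F : PySem.Dict String Int) (hF : DSub (buildDoc p doc).1 F) :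
    doc.foldl encodeWordA (p.1, p.2, edoc) =
      ((buildDoc p doc).1, (buildDoc p doc).2,
        edoc ++ doc.map (fun w => F.getD w 0)) := by
  induction doc generalizing p edoc with
  | nil => simp [buildDoc]
  | cons w rest ih =>
      have hstep : encodeWordA (p.1, p.2, edoc) w =
          ((buildWord p w).1, (buildWord p w).2, edoc ++ [(buildWord p w).1.getD w 0]) := by
        simp only [encodeWordA, buildWord]
      have hbd : buildDoc p (w :: rest) = buildDoc (buildWord p w) rest := rfl
      rw [hbd] at hF
      have hsub : DSub (buildWord p w).1 F :=
        dsub_trans (dsub_buildDoc (buildWord p w) rest) hF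
      have hval : (buildWord p w).1.getD w 0 = F.getD w 0 :=
        getD_eq_of_sub hsub w (contains_buildWord_self p w)
      simp only [List.foldl_cons, hstep, hval]
      rw [ih (buildWord p w) (edoc ++ [F.getD w 0]) hF]
      simp [hbd]

-- A's outer loop = B's pass-1 fold plus B's pass-2 fold against any extension F of the final table
theorem outerA_eq (ds : List (List String)) (p : PySem.Dict String Int × List String)
    (edocs : List (List Int)) (F : PySem.Dict String Int)
    (hF : DSub (ds.foldl buildDoc p).1 F) :
    ds.foldl encodeDocA (p.1, p.2, edocs) =
      ((ds.foldl buildDoc p).1, (ds.foldl buildDoc p).2,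
        ds.foldl (fun acc doc => if doc.isEmpty then acc
          else acc ++ [doc.map (fun w => F.getD w 0) ++ [(1 : Int)]]) edocs) := by
  induction ds generalizing p edocs with
  | nil => simp
  | cons d rest ih =>
      have hsub : DSub (buildDoc p d).1 F :=
        dsub_trans (dsub_foldl_buildDoc (buildDoc p d) rest) hF
      have hstep : encodeDocA (p.1, p.2, edocs) d =
          ((buildDoc p d).1, (buildDoc p d).2,
            if d.isEmpty then edocs
            else edocs ++ [d.map (fun w => F.getD w 0) ++ [(1 : Int)]]) := by
        unfold encodeDocA
        rw [innerA_eq d p [] F hsub]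
        cases d with
        | nil => simp
        | cons w ws => simp
      simp only [List.foldl_cons, hstep]
      exact ih (buildDoc p d) _ hF

-- ===== VERDICT (by name: the statement is the Claim_ definition above) =====
theorem encode_docs_spec : Claim_equal_encode_docs := by
  intro docs _
  show encode_docs docs = encode_docs_alt docs
  have h := outerA_eq docs
      (PySem.Dict.ofList [("<s>", (0 : Int)), ("</s>", (1 : Int))], ["<s>", "</s>"]) []
      ((docs.foldl buildDoc
        (PySem.Dict.ofList [("<s>", (0 : Int)), ("</s>", (1 : Int))], ["<s>", "</s>"])).1)
      (dsub_refl _)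
  have hA : encode_docs docs =
      ((docs.foldl encodeDocA
          (PySem.Dict.ofList [("<s>", (0 : Int)), ("</s>", (1 : Int))], ["<s>", "</s>"], [])).2.1,
       (docs.foldl encodeDocA
          (PySem.Dict.ofList [("<s>", (0 : Int)), ("</s>", (1 : Int))], ["<s>", "</s>"], [])).2.2) := rfl
  rw [hA, h]
  rfl
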